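-- pv_equiv track=rewrite | github.com/KKKirino/Coding-Every-Day | 2020/study-algo-with-zyf/traverse-graph.py | count_islands_area_bfs
-- ===== SOURCE A (Python) =====
-- def count_islands_area_bfs(blocks: list) -> int:
--   if len(blocks) == 0 or len(blocks[0]) == 0:
--     return 0
--
--   d = [[0, 1], [0, -1], [-1, 0], [1, 0]]
--   rows, cols = len(blocks), len(blocks[0])
--   res = []
--   blocks = [list(line) for line in blocks]
--   for r in range(rows):
--     for c in range(cols):
--       if blocks[r][c] == '1':
--         queue = [[r, c]]
--         count = 0
--
--         while queue:
--           [cr, cc] = queue.pop(0)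
--           if blocks[cr][cc] == '0': continue
--           count += 1
--           blocks[cr][cc] = '0'
--           for dr, dc in d:
--             nr, nc = cr + dr, cc + dc
--             if nr >= len(blocks) or nr < 0 or nc >= len(blocks[0]) or nc < 0: continue
--             queue.append([nr, nc])
--
--         res.append(count)
--   return res
-- ===== SOURCE B (Python) =====
-- def count_islands_area_bfs(blocks: list) -> int:
--   rows = len(blocks)
--   cols = len(blocks[0]) if blocks else 0
--   land = {(r, c) for r in range(rows) for c in range(cols) if blocks[r][c] != '0'}
--   res = []
--   for r in range(rows):
--     for c in range(cols):
--       if blocks[r][c] == '1' and (r, c) in land: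
--         comp = {(r, c)}
--         frontier = {(r, c)}
--         while frontier:
--           frontier = {(cr + dr, cc + dc)
--                       for (cr, cc) in frontier
--                       for (dr, dc) in ((0, 1), (0, -1), (-1, 0), (1, 0))
--                       if (cr + dr, cc + dc) in land and (cr + dr, cc + dc) not in comp}
--           comp |= frontier
--         land -= comp
--         res.append(len(comp))
--   return res
-- ===== Notes on version B (the rewrite author's own statement) =====
-- stated objective: alternative
-- what changed: Replaces the mutable-grid queue BFS (pop-from-front worklist that re-enqueues and re-tests individual cells, marking visited cells by overwriting the grid copy) with a frontier-saturation flood fill over immutable coordinate sets: land/visited are sets, each island is grown level-by-level with set comprehensions until the frontier is empty, and the grid is never mutated.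
-- outside the precondition, e.g. on count_islands_area_bfs([]): A returns 0, B returns []; on count_islands_area_bfs(['', '1']): A returns 0, B returns []
import Mathlib
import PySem

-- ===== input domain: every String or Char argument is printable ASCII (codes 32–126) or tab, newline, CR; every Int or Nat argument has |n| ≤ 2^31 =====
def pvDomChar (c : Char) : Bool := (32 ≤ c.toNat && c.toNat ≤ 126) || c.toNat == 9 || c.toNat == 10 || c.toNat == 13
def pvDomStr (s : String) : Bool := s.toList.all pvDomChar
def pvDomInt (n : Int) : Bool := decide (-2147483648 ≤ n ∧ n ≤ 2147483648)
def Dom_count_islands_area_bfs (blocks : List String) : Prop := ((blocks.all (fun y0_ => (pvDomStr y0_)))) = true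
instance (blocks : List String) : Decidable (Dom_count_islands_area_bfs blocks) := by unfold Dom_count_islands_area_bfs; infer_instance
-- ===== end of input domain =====

-- B replaces the mutable-grid queue BFS with a frontier-saturation flood fill over
-- immutable coordinate sets (alternative decomposition; no speed claim).
-- Return-value equivalence only: A mutates only a local copy of the grid, never its argument.

-- ===== PORT A =====
-- the direction table d = [[0,1],[0,-1],[-1,0],[1,0]]
def pvDirs : List (Int × Int) := [(0, 1), (0, -1), (-1, 0), (1, 0)]

-- (termination measure helper, not part of A's code): number of non-'0' cells
def pvLandTotal (g : List (List Char)) : Nat :=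
  (g.map (fun row => row.countP (fun ch => !(ch == '0')))).sum

lemma pvCountP_set_lt (row : List Char) (kc : Nat) (ch : Char)
    (hget : row[kc]? = some ch) (hch : ¬ ch = '0') :
    (row.set kc '0').countP (fun ch => !(ch == '0')) < row.countP (fun ch => !(ch == '0')) := by
  induction row generalizing kc with
  | nil => simp at hget
  | cons a t ih =>
    cases kc with
    | zero =>
      simp at hget
      subst hget
      simp only [List.set_cons_zero, List.countP_cons]
      simp [hch]
    | succ k =>
      simp at hget
      have := ih k hget
      simp only [List.set_cons_succ, List.countP_cons]
      omega

lemma pvLandTotal_set_lt (g : List (List Char)) (kr : Nat) (row : List Char) (kc : Nat) (ch : Char)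
    (hrow : g[kr]? = some row) (hget : row[kc]? = some ch) (hch : ¬ ch = '0') :
    pvLandTotal (g.set kr (row.set kc '0')) < pvLandTotal g := by
  induction g generalizing kr with
  | nil => simp at hrow
  | cons a t ih =>
    cases kr with
    | zero =>
      simp at hrow
      subst hrow
      have := pvCountP_set_lt a kc ch hget hch
      simp only [List.set_cons_zero, pvLandTotal, List.map_cons, List.sum_cons]
      omega
    | succ k =>
      simp at hrow
      have := ih k hrow
      simp only [List.set_cons_succ, pvLandTotal, List.map_cons, List.sum_cons] at this ⊢
      omega

-- the in-bounds neighbours A enqueues around (cr, cc) (the bounds test of A's inner loop)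
def pvNbrsA (g' : List (List Char)) (cr cc : Int) : List (Int × Int) :=
  pvDirs.filterMap (fun dd =>
    let nr := cr + dd.1
    let nc := cc + dd.2
    if (g'.length : Int) ≤ nr ∨ nr < 0 ∨ ((PySem.List.pyGetD g' 0 []).length : Int) ≤ nc ∨ nc < 0
    then none else some (nr, nc))

lemma pvNbrsA_length (g' : List (List Char)) (cr cc : Int) : (pvNbrsA g' cr cc).length ≤ 4 := by
  have := List.length_filterMap_le (fun (dd : Int × Int) =>
    let nr := cr + dd.1
    let nc := cc + dd.2
    if (g'.length : Int) ≤ nr ∨ nr < 0 ∨ ((PySem.List.pyGetD g' 0 []).length : Int) ≤ nc ∨ nc < 0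
    then none else some (nr, nc)) pvDirs
  simpa [pvNbrsA, pvDirs] using this

-- termination fact the recursion below cites: marking a non-'0' cell shrinks pvLandTotal
lemma pvBfs_dec {g : List (List Char)} {cr cc : Int} {ch : Char}
    (h : ((PySem.List.pyGet? g cr).bind fun row => PySem.List.pyGet? row cc) = some ch)
    (hch : ¬ ch = '0') :
    pvLandTotal (PySem.List.pySetD g cr (PySem.List.pySetD (PySem.List.pyGetD g cr []) cc '0')) < pvLandTotal g := by
  rw [Option.bind_eq_some_iff] at h
  obtain ⟨row, hrow, hc⟩ := h
  unfold PySem.List.pyGet? at hrow hc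
  rw [Option.bind_eq_some_iff] at hrow hc
  obtain ⟨kr, hkr, hkr2⟩ := hrow
  obtain ⟨kc, hkc, hkc2⟩ := hc
  have hD : PySem.List.pyGetD g cr [] = row := by
    unfold PySem.List.pyGetD PySem.List.pyGet?
    rw [hkr]; simp [hkr2]
  have hS1 : PySem.List.pySetD row cc '0' = row.set kc '0' := by
    unfold PySem.List.pySetD PySem.List.pySet?
    rw [hkc]; simp
  have hS2 : PySem.List.pySetD g cr (row.set kc '0') = g.set kr (row.set kc '0') := by
    unfold PySem.List.pySetD PySem.List.pySet?
    rw [hkr]; simp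
  rw [hD, hS1, hS2]
  exact pvLandTotal_set_lt g kr row kc ch hkr2 hkc2 hch

-- the while-queue loop of A (pop(0); skip '0' cells; mark and enqueue the 4 neighbours)
def pvBfs (g : List (List Char)) (queue : List (Int × Int)) (count : Int) :
    List (List Char) × Int :=
  match queue with
  | [] => (g, count)
  | (cr, cc) :: rest =>
    match h : ((PySem.List.pyGet? g cr).bind fun row => PySem.List.pyGet? row cc) with
    | none => pvBfs g rest count      -- Python raises IndexError here; unreachable under Pre_
    | some ch =>
      if hch : ch = '0' then pvBfs g rest count
      else
        let g' := PySem.List.pySetD g cr (PySem.List.pySetD (PySem.List.pyGetD g cr []) cc '0')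
        pvBfs g' (rest ++ pvNbrsA g' cr cc) (count + 1)
termination_by 5 * pvLandTotal g + queue.length
decreasing_by
  · simp
  · simp
  · have hdec := pvBfs_dec h hch
    have hlen := pvNbrsA_length (PySem.List.pySetD g cr (PySem.List.pySetD (PySem.List.pyGetD g cr []) cc '0')) cr cc
    simp only [List.length_append, List.length_cons]
    omega

def count_islands_area_bfs (blocks : List String) : List Int :=
  -- Python returns the int 0 on this branch (not a list); those inputs are excluded by Pre_
  if blocks.length = 0 ∨ PySem.Str.len (PySem.List.pyGetD blocks 0 "") = 0 then []
  else
    let rows : Int := blocks.length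
    let cols : Int := PySem.Str.len (PySem.List.pyGetD blocks 0 "")
    let g0 : List (List Char) := blocks.map String.toList
    let final := (PySem.List.pyRange 0 rows 1).foldl (fun st r =>
      (PySem.List.pyRange 0 cols 1).foldl (fun (st : List (List Char) × List Int) c =>
        if ((PySem.List.pyGet? st.1 r).bind fun row => PySem.List.pyGet? row c) = some '1' then
          let p := pvBfs st.1 [(r, c)] 0
          (p.1, st.2 ++ [p.2])
        else st) st) (g0, ([] : List Int))
    final.2

-- ===== PORT B =====
-- the 4 neighbours of a cell (B iterates the same direction tuple)
def pvNbrs (p : Int × Int) : List (Int × Int) :=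
  pvDirs.map (fun dd => (p.1 + dd.1, p.2 + dd.2))

-- blocks[r][c] on the original, unmutated list of strings
def pvCellS (blocks : List String) (r c : Int) : Option Char :=
  (PySem.List.pyGet? blocks r).bind fun s => PySem.Str.pyGet? s c

-- blocks[r][c] != '0'
def pvIsLandCell (blocks : List String) (r c : Int) : Bool :=
  match pvCellS blocks r c with
  | some ch => ch != '0'
  | none => false        -- Python raises IndexError here; unreachable under Pre_

-- the next frontier: unvisited land neighbours of the current frontier
def pvFrontierNext (land comp frontier : PySem.Set (Int × Int)) : PySem.Set (Int × Int) :=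
  PySem.Set.ofList (frontier.flatMap (fun p =>
    (pvNbrs p).filter (fun q =>
      PySem.Set.contains land q && !(PySem.Set.contains comp q))))

lemma pvCountP_lt_of_pointwise {α : Type} (l : List α) (p q : α → Bool)
    (hpq : ∀ x ∈ l, q x → p x) (x : α) (hx : x ∈ l) (hpx : p x) (hqx : ¬ q x) :
    l.countP q < l.countP p := by
  induction l with
  | nil => simp at hx
  | cons a t ih =>
    have himp : q a = true → p a = true := hpq a List.mem_cons_self
    by_cases hax : x = a
    · subst hax
      have hq' : q x = false := by simpa using hqx
      have hmono : t.countP q ≤ t.countP p :=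
        List.countP_mono_left (fun y hy => hpq y (List.mem_cons_of_mem _ hy))
      simp only [List.countP_cons, hq', hpx]
      simp
      omega
    · have hxt : x ∈ t := by
        rcases List.mem_cons.mp hx with h | h
        · exact absurd h hax
        · exact h
      have hstrict := ih (fun y hy => hpq y (List.mem_cons_of_mem _ hy)) hxt
      have hle : (if q a = true then (1 : Nat) else 0) ≤ (if p a = true then 1 else 0) := by
        split_ifs with h1 h2
        · omega
        · exact absurd (himp h1) h2
        · omega
        · omega
      simp only [List.countP_cons]
      exact Nat.add_lt_add_of_lt_of_le hstrict hle

-- termination fact the recursion below cites: a nonempty next frontier visits new land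
lemma pvGrow_dec (land comp frontier : PySem.Set (Int × Int))
    (hf' : pvFrontierNext land comp frontier ≠ []) :
    land.countP (fun q => !(PySem.Set.contains (PySem.Set.union comp (pvFrontierNext land comp frontier)) q))
      < land.countP (fun q => !(PySem.Set.contains comp q)) := by
  obtain ⟨x, hx⟩ := List.exists_mem_of_ne_nil _ hf'
  have hx' := (PySem.Set.mem_ofList _ _).mp hx
  rw [List.mem_flatMap] at hx'
  obtain ⟨p, hp, hxf⟩ := hx'
  rw [List.mem_filter] at hxf
  obtain ⟨hxn, hcond⟩ := hxf
  rw [Bool.and_eq_true, Bool.not_eq_true'] at hcond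
  obtain ⟨hxland, hxcomp⟩ := hcond
  have hxmemland : x ∈ land := (PySem.Set.contains_iff _ _).mp hxland
  have hxmemun : x ∈ PySem.Set.union comp (pvFrontierNext land comp frontier) := by
    rw [PySem.Set.mem_union]; right; exact hx
  refine pvCountP_lt_of_pointwise land _ _ ?_ x hxmemland ?_ ?_
  · intro y hy hq
    rw [Bool.not_eq_true'] at hq ⊢
    rw [Bool.eq_false_iff] at hq ⊢
    intro hc
    exact hq ((PySem.Set.contains_iff _ _).mpr (by
      rw [PySem.Set.mem_union]; left; exact (PySem.Set.contains_iff _ _).mp hc))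
  · rw [Bool.not_eq_true', hxcomp]
  · have hcu := (PySem.Set.contains_iff _ _).mpr hxmemun
    rw [Bool.not_eq_true]
    rw [Bool.not_eq_false']
    exact hcu

-- the while-frontier loop of B: grow the component level by level
def pvGrow (land comp frontier : PySem.Set (Int × Int)) : PySem.Set (Int × Int) :=
  if hf : frontier = [] then comp
  else
    pvGrow land (PySem.Set.union comp (pvFrontierNext land comp frontier))
      (pvFrontierNext land comp frontier)
termination_by (land.countP (fun q => !(PySem.Set.contains comp q)), frontier.length)
decreasing_by
  rcases eq_or_ne (pvFrontierNext land comp frontier) [] with hf' | hf'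
  · rw [hf']
    have hun : PySem.Set.union comp ([] : PySem.Set (Int × Int)) = comp := rfl
    rw [hun]
    exact Prod.Lex.right _ (by simpa using List.length_pos_of_ne_nil hf)
  · exact Prod.Lex.left _ _ (pvGrow_dec land comp frontier hf')

def count_islands_area_bfs_alt (blocks : List String) : List Int :=
  let rows : Int := blocks.length
  let cols : Int := if blocks.length = 0 then 0 else PySem.Str.len (PySem.List.pyGetD blocks 0 "")
  let land0 : PySem.Set (Int × Int) := PySem.Set.ofList
    ((PySem.List.pyRange 0 rows 1).flatMap (fun r =>
      ((PySem.List.pyRange 0 cols 1).filter (fun c => pvIsLandCell blocks r c)).map (fun c => (r, c))))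
  let final := (PySem.List.pyRange 0 rows 1).foldl (fun st r =>
    (PySem.List.pyRange 0 cols 1).foldl (fun (st : PySem.Set (Int × Int) × List Int) c =>
      if pvCellS blocks r c = some '1' ∧ (r, c) ∈ st.1 then
        let comp := pvGrow st.1 [(r, c)] [(r, c)]
        (PySem.Set.diff st.1 comp, st.2 ++ [(comp.length : Int)])
      else st) st) (land0, ([] : List Int))
  final.2

-- ===== PRECONDITION & SPEC =====
-- Pre_ excludes (i) empty grids and grids whose first row is empty, where A returns the
-- int 0 instead of a list, and (ii) grids with a row shorter than the first row, where
-- A raises IndexError.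
def Pre_count_islands_area_bfs (blocks : List String) : Prop :=
  blocks ≠ [] ∧ (blocks.headD "").toList.length ≠ 0 ∧
    ∀ s ∈ blocks, (blocks.headD "").toList.length ≤ s.toList.length
instance (blocks : List String) : Decidable (Pre_count_islands_area_bfs blocks) := by
  unfold Pre_count_islands_area_bfs; infer_instance
def pvWitness_count_islands_area_bfs : List String := ["110", "011"]

def Spec_count_islands_area_bfs (blocks : List String) (out : List Int) : Prop :=
  out = count_islands_area_bfs_alt blocks
instance (blocks : List String) (out : List Int) : Decidable (Spec_count_islands_area_bfs blocks out) := by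
  unfold Spec_count_islands_area_bfs; infer_instance

-- ===== CLAIM (what is proved, stated in full; the proofs are below) =====
def Claim_equal_count_islands_area_bfs : Prop := ∀ (blocks : List String), Dom_count_islands_area_bfs blocks → Pre_count_islands_area_bfs blocks → Spec_count_islands_area_bfs blocks (count_islands_area_bfs blocks)

-- ===== LEMMAS AND PROOFS =====

-- ---- proof-layer notions: cells, the scan window, land cells, reachability ----

def pvCellL (g : List (List Char)) (p : Int × Int) : Option Char :=
  (PySem.List.pyGet? g p.1).bind fun row => PySem.List.pyGet? row p.2

def pvInW (rows cols : Int) (p : Int × Int) : Prop :=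
  0 ≤ p.1 ∧ p.1 < rows ∧ 0 ≤ p.2 ∧ p.2 < cols

def pvLandP (g : List (List Char)) (cols : Int) (p : Int × Int) : Prop :=
  pvInW g.length cols p ∧ ∃ ch, pvCellL g p = some ch ∧ ch ≠ '0'

def pvStepRel (L : Int × Int → Prop) (a b : Int × Int) : Prop := b ∈ pvNbrs a ∧ L b

def pvReach (L : Int × Int → Prop) (s x : Int × Int) : Prop :=
  Relation.ReflTransGen (pvStepRel L) s x

def pvReachFrom (L : Int × Int → Prop) (srcs : List (Int × Int)) : Set (Int × Int) :=
  {x | ∃ s ∈ srcs, L s ∧ pvReach L s x}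

lemma pvReach_mono {L L' : Int × Int → Prop} (h : ∀ p, L p → L' p) {s x : Int × Int}
    (hr : pvReach L s x) : pvReach L' s x :=
  Relation.ReflTransGen.mono (fun _ _ hab => ⟨hab.1, h _ hab.2⟩) hr

lemma pvReach_land {L : Int × Int → Prop} {s x : Int × Int} (hs : L s)
    (hr : pvReach L s x) : L x := by
  rcases Relation.ReflTransGen.cases_tail hr with h | ⟨c, _, hc⟩
  · subst h; exact hs
  · exact hc.2

lemma pvMem_reachFrom_L {L : Int × Int → Prop} {srcs : List (Int × Int)} {x : Int × Int}
    (hx : x ∈ pvReachFrom L srcs) : L x := by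
  obtain ⟨s, _, hLs, hr⟩ := hx
  exact pvReach_land hLs hr

lemma pvReachFrom_nil (L : Int × Int → Prop) : pvReachFrom L [] = ∅ := by
  ext x; simp [pvReachFrom]

lemma pvReachFrom_cons_not {L : Int × Int → Prop} {s : Int × Int} {rest : List (Int × Int)}
    (hL : ¬ L s) : pvReachFrom L (s :: rest) = pvReachFrom L rest := by
  ext x
  constructor
  · rintro ⟨t, ht, hLt, hr⟩
    rcases List.mem_cons.mp ht with rfl | ht
    · exact absurd hLt hL
    · exact ⟨t, ht, hLt, hr⟩
  · rintro ⟨t, ht, hLt, hr⟩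
    exact ⟨t, List.mem_cons_of_mem _ ht, hLt, hr⟩

lemma pvMem_nbrs_ne {p q : Int × Int} (h : q ∈ pvNbrs p) : q ≠ p := by
  simp only [pvNbrs, pvDirs, List.map_cons, List.map_nil, List.mem_cons, List.not_mem_nil,
    or_false] at h
  rcases h with h | h | h | h <;> subst h <;>
    (intro hq; rw [Prod.ext_iff] at hq; omega)

lemma pvLand_finite (g : List (List Char)) (cols : Int) :
    {p : Int × Int | pvLandP g cols p}.Finite := by
  apply Set.Finite.subset (Set.finite_Icc ((0 : Int), (0 : Int)) ((g.length : Int) - 1, cols - 1))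
  intro p hp
  obtain ⟨⟨h1, h2, h3, h4⟩, -⟩ := hp
  constructor
  · exact ⟨h1, h3⟩
  · exact ⟨by omega, by omega⟩

lemma pvReachFrom_subset (g : List (List Char)) (cols : Int) (srcs : List (Int × Int)) :
    pvReachFrom (pvLandP g cols) srcs ⊆ {p | pvLandP g cols p} :=
  fun _ hx => pvMem_reachFrom_L hx

lemma pvReachFrom_finite (g : List (List Char)) (cols : Int) (srcs : List (Int × Int)) :
    (pvReachFrom (pvLandP g cols) srcs).Finite :=
  (pvLand_finite g cols).subset (pvReachFrom_subset g cols srcs)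

-- splitting a path at the removed cell x0
lemma pvReach_split {L L' : Int × Int → Prop} {x0 : Int × Int}
    (hL' : ∀ p, L' p ↔ L p ∧ p ≠ x0) {s x : Int × Int}
    (h : pvReach L s x) (hx : x ≠ x0) :
    (s ≠ x0 ∧ pvReach L' s x) ∨ (∃ n, n ∈ pvNbrs x0 ∧ L' n ∧ pvReach L' n x) := by
  induction h using Relation.ReflTransGen.head_induction_on with
  | refl => exact Or.inl ⟨hx, Relation.ReflTransGen.refl⟩
  | head h' htail ih =>
    rename_i a c
    obtain ⟨hnc, hLc⟩ := h'
    by_cases hax : a = x0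
    · subst hax
      have hcne : c ≠ a := pvMem_nbrs_ne hnc
      have hL'c : L' c := (hL' c).mpr ⟨hLc, hcne⟩
      rcases ih with ⟨-, hrc⟩ | ⟨n, hn, hL'n, hrn⟩
      · exact Or.inr ⟨c, hnc, hL'c, hrc⟩
      · exact Or.inr ⟨n, hn, hL'n, hrn⟩
    · rcases ih with ⟨hcne, hrc⟩ | ⟨n, hn, hL'n, hrn⟩
      · exact Or.inl ⟨hax, Relation.ReflTransGen.head ⟨hnc, (hL' c).mpr ⟨hLc, hcne⟩⟩ hrc⟩
      · exact Or.inr ⟨n, hn, hL'n, hrn⟩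

-- the BFS step: counting x0 and removing it from the land trades the source x0 for its neighbours
lemma pvReachFrom_decomp {L L' : Int × Int → Prop} {x0 : Int × Int}
    {rest nbrsW : List (Int × Int)}
    (hLx0 : L x0)
    (hL' : ∀ p, L' p ↔ L p ∧ p ≠ x0)
    (hnbW : ∀ n, n ∈ pvNbrs x0 → L n → n ∈ nbrsW)
    (hnbW' : ∀ n ∈ nbrsW, n ∈ pvNbrs x0) :
    pvReachFrom L (x0 :: rest) = insert x0 (pvReachFrom L' (rest ++ nbrsW)) ∧
      x0 ∉ pvReachFrom L' (rest ++ nbrsW) := by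
  have hx0not : x0 ∉ pvReachFrom L' (rest ++ nbrsW) := by
    intro hmem
    have := pvMem_reachFrom_L hmem
    exact ((hL' x0).mp this).2 rfl
  refine ⟨Set.ext fun x => ⟨?_, ?_⟩, hx0not⟩
  · rintro ⟨s, hs, hLs, hr⟩
    by_cases hxx : x = x0
    · exact Or.inl hxx
    · right
      rcases pvReach_split hL' hr hxx with ⟨hsne, hr'⟩ | ⟨n, hn, hL'n, hrn⟩
      · rcases List.mem_cons.mp hs with rfl | hs
        · exact absurd rfl hsne
        · exact ⟨s, List.mem_append_left _ hs, (hL' s).mpr ⟨hLs, hsne⟩, hr'⟩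
      · have hnW : n ∈ nbrsW := hnbW n hn ((hL' n).mp hL'n).1
        exact ⟨n, List.mem_append_right _ hnW, hL'n, hrn⟩
  · rintro (rfl | ⟨s, hs, hL's, hr⟩)
    · exact ⟨x, List.mem_cons_self, hLx0, Relation.ReflTransGen.refl⟩
    · have hLs : L s := ((hL' s).mp hL's).1
      have hr' : pvReach L s x := pvReach_mono (fun p hp => ((hL' p).mp hp).1) hr
      rcases List.mem_append.mp hs with hs | hs
      · exact ⟨s, List.mem_cons_of_mem _ hs, hLs, hr'⟩
      · refine ⟨x0, List.mem_cons_self, hLx0, ?_⟩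
        exact Relation.ReflTransGen.head ⟨hnbW' s hs, hLs⟩ hr'


-- ---- characterization of B's frontier loop ----

lemma pvMem_frontierNext (land comp frontier : PySem.Set (Int × Int)) (q : Int × Int) :
    q ∈ pvFrontierNext land comp frontier ↔
      (∃ p ∈ frontier, q ∈ pvNbrs p) ∧ q ∈ land ∧ q ∉ comp := by
  unfold pvFrontierNext
  rw [PySem.Set.mem_ofList, List.mem_flatMap]
  constructor
  · rintro ⟨p, hp, hq⟩
    rw [List.mem_filter] at hq
    obtain ⟨hqn, hcond⟩ := hq
    rw [Bool.and_eq_true, Bool.not_eq_true'] at hcond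
    refine ⟨⟨p, hp, hqn⟩, (PySem.Set.contains_iff _ _).mp hcond.1, ?_⟩
    intro hqc
    rw [← PySem.Set.contains_iff _ _] at hqc
    rw [hqc] at hcond
    simpa using hcond.2
  · rintro ⟨⟨p, hp, hqn⟩, hql, hqc⟩
    refine ⟨p, hp, ?_⟩
    rw [List.mem_filter, Bool.and_eq_true, Bool.not_eq_true']
    refine ⟨hqn, (PySem.Set.contains_iff _ _).mpr hql, ?_⟩
    rw [Bool.eq_false_iff]
    intro hc
    exact hqc ((PySem.Set.contains_iff _ _).mp hc)

-- a path that starts inside comp ends inside comp or passes through the next frontier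
lemma pvGrow_walk (land comp frontier f' : List (Int × Int))
    (hclosed : ∀ p ∈ comp, p ∉ frontier → ∀ q ∈ pvNbrs p, q ∈ land → q ∈ comp)
    (hf' : ∀ q, q ∈ f' ↔ (∃ p ∈ frontier, q ∈ pvNbrs p) ∧ q ∈ land ∧ q ∉ comp)
    {y x : Int × Int} (hr : pvReach (· ∈ land) y x) (hy : y ∈ comp) :
    x ∈ comp ∨ ∃ n ∈ f', pvReach (· ∈ land) n x := by
  induction hr using Relation.ReflTransGen.head_induction_on with
  | refl => exact Or.inl hy
  | head h' htail ih =>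
    rename_i a c
    obtain ⟨hnc, hLc⟩ := h'
    by_cases hcc : c ∈ comp
    · exact ih hcc
    · by_cases haf : a ∈ frontier
      · exact Or.inr ⟨c, (hf' c).mpr ⟨⟨a, haf, hnc⟩, hLc, hcc⟩, htail⟩
      · exact absurd (hclosed a hy haf c hnc hLc) hcc

lemma pvGrow_spec (land : PySem.Set (Int × Int)) :
    ∀ (comp frontier : PySem.Set (Int × Int)),
    comp.Nodup →
    (∀ p ∈ frontier, p ∈ comp) →
    (∀ p ∈ comp, p ∈ land) →
    (∀ p ∈ comp, p ∉ frontier → ∀ q ∈ pvNbrs p, q ∈ land → q ∈ comp) →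
    (pvGrow land comp frontier).Nodup ∧
      (∀ p ∈ pvGrow land comp frontier, p ∈ land) ∧
      (∀ x, x ∈ pvGrow land comp frontier ↔
        x ∈ comp ∨ ∃ f ∈ frontier, pvReach (· ∈ land) f x) := by
  intro comp frontier
  induction comp, frontier using pvGrow.induct land with
  | case1 comp =>
    intro hnd _ hcl _
    rw [pvGrow]
    exact ⟨hnd, hcl, fun x => by simp⟩
  | case2 comp frontier hf ih =>
    intro hnd hfc hcl hclosed
    have hmemf' := pvMem_frontierNext land comp frontier
    -- invariants for the recursive call
    have hnd' : (comp.union (pvFrontierNext land comp frontier)).Nodup :=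
      PySem.Set.nodup_union _ _ hnd
    have hfc' : ∀ p ∈ pvFrontierNext land comp frontier,
        p ∈ comp.union (pvFrontierNext land comp frontier) := by
      intro p hp; rw [PySem.Set.mem_union]; exact Or.inr hp
    have hcl' : ∀ p ∈ comp.union (pvFrontierNext land comp frontier), p ∈ land := by
      intro p hp
      rcases (PySem.Set.mem_union _ _ _).mp hp with hp | hp
      · exact hcl p hp
      · exact ((hmemf' p).mp hp).2.1
    have hclosed' : ∀ p ∈ comp.union (pvFrontierNext land comp frontier),
        p ∉ pvFrontierNext land comp frontier →
        ∀ q ∈ pvNbrs p, q ∈ land → q ∈ comp.union (pvFrontierNext land comp frontier) := by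
      intro p hp hpf q hqn hql
      rw [PySem.Set.mem_union]
      rcases (PySem.Set.mem_union _ _ _).mp hp with hp | hp
      · by_cases hpfr : p ∈ frontier
        · by_cases hqc : q ∈ comp
          · exact Or.inl hqc
          · exact Or.inr ((hmemf' q).mpr ⟨⟨p, hpfr, hqn⟩, hql, hqc⟩)
        · exact Or.inl (hclosed p hp hpfr q hqn hql)
      · exact absurd hp hpf
    obtain ⟨ihnd, ihland, ihmem⟩ := ih hnd' hfc' hcl' hclosed'
    rw [pvGrow, dif_neg hf]
    refine ⟨ihnd, ihland, fun x => ?_⟩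
    rw [ihmem x]
    constructor
    · rintro (hx | ⟨f, hf2, hrf⟩)
      · rcases (PySem.Set.mem_union _ _ _).mp hx with hx | hx
        · exact Or.inl hx
        · obtain ⟨⟨p, hp, hxn⟩, hxl, _⟩ := (hmemf' x).mp hx
          exact Or.inr ⟨p, hp, Relation.ReflTransGen.single ⟨hxn, hxl⟩⟩
      · obtain ⟨⟨p, hp, hfn⟩, hfl, _⟩ := (hmemf' f).mp hf2
        exact Or.inr ⟨p, hp, Relation.ReflTransGen.head ⟨hfn, hfl⟩ hrf⟩
    · rintro (hx | ⟨f, hf2, hrf⟩)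
      · left; rw [PySem.Set.mem_union]; exact Or.inl hx
      · rcases pvGrow_walk land comp frontier (pvFrontierNext land comp frontier)
          hclosed (fun q => hmemf' q) hrf (hfc f hf2) with hxc | ⟨n, hn, hrn⟩
        · left; rw [PySem.Set.mem_union]; exact Or.inl hxc
        · exact Or.inr ⟨n, hn, hrn⟩

-- ---- equation lemmas for pvBfs ----

lemma pvBfs_nil (g : List (List Char)) (k : Int) : pvBfs g [] k = (g, k) := by
  rw [pvBfs]

lemma pvBfs_cons_zero {g : List (List Char)} {cr cc : Int} {rest : List (Int × Int)} {k : Int}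
    (h : ((PySem.List.pyGet? g cr).bind fun row => PySem.List.pyGet? row cc) = some '0') :
    pvBfs g ((cr, cc) :: rest) k = pvBfs g rest k := by
  rw [pvBfs]
  split
  · rename_i heq; simp [h] at heq
  · rename_i ch heq
    rw [h] at heq
    injection heq with heq
    subst heq
    rw [dif_pos rfl]

lemma pvBfs_cons_land {g : List (List Char)} {cr cc : Int} {rest : List (Int × Int)} {k : Int}
    {ch : Char}
    (h : ((PySem.List.pyGet? g cr).bind fun row => PySem.List.pyGet? row cc) = some ch)
    (hch : ch ≠ '0') :
    pvBfs g ((cr, cc) :: rest) k =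
      pvBfs (PySem.List.pySetD g cr (PySem.List.pySetD (PySem.List.pyGetD g cr []) cc '0'))
        (rest ++ pvNbrsA (PySem.List.pySetD g cr (PySem.List.pySetD (PySem.List.pyGetD g cr []) cc '0')) cr cc)
        (k + 1) := by
  rw [pvBfs]
  split
  · rename_i heq; simp [h] at heq
  · rename_i ch' heq
    rw [h] at heq
    injection heq with heq
    subst heq
    rw [dif_neg hch]

-- ---- the mutated grid after marking one cell ----

lemma pvSetD_eq_set {g : List (List Char)} {cr cc : Int} {row : List Char} {ch : Char}
    (hrow : PySem.List.pyGet? g cr = some row)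
    (_hc : PySem.List.pyGet? row cc = some ch)
    (hcr : 0 ≤ cr) (hcc : 0 ≤ cc) :
    PySem.List.pySetD g cr (PySem.List.pySetD (PySem.List.pyGetD g cr []) cc '0') =
      g.set cr.toNat (row.set cc.toNat '0') := by
  have hD : PySem.List.pyGetD g cr [] = row := by
    unfold PySem.List.pyGetD; rw [hrow]; rfl
  rw [hD, PySem.List.pySetD_of_nonneg _ _ hcc, PySem.List.pySetD_of_nonneg _ _ hcr]

lemma pvGet?_bounds {α : Type} {xs : List α} {i : Int} {v : α}
    (h : PySem.List.pyGet? xs i = some v) (hi : 0 ≤ i) :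
    i.toNat < xs.length ∧ xs[i.toNat]? = some v := by
  rw [PySem.List.pyGet?_of_nonneg _ hi] at h
  exact ⟨(List.getElem?_eq_some_iff.mp h).1, h⟩

lemma pvCellL_set {g : List (List Char)} {row : List Char} {kr kc : Nat}
    (hkr : g[kr]? = some row) (hkc : kc < row.length) :
    ∀ p : Int × Int, 0 ≤ p.1 → 0 ≤ p.2 →
      pvCellL (g.set kr (row.set kc '0')) p =
        if p = ((kr : Int), (kc : Int)) then some '0' else pvCellL g p := by
  intro p h1 h2
  have hkr' : kr < g.length := (List.getElem?_eq_some_iff.mp hkr).1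
  unfold pvCellL
  rw [PySem.List.pyGet?_of_nonneg _ h1, PySem.List.pyGet?_of_nonneg _ h1,
    List.getElem?_set]
  by_cases hr : kr = p.1.toNat
  · subst hr
    rw [if_pos rfl, if_pos hkr']
    simp only [Option.bind_some]
    rw [hkr]
    simp only [Option.bind_some]
    rw [PySem.List.pyGet?_of_nonneg _ h2, PySem.List.pyGet?_of_nonneg _ h2,
      List.getElem?_set]
    by_cases hcx : kc = p.2.toNat
    · subst hcx
      rw [if_pos rfl, if_pos hkc]
      rw [if_pos (by rw [Prod.ext_iff]; constructor <;> simp <;> omega)]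
    · rw [if_neg hcx]
      rw [if_neg (by rw [Prod.ext_iff]; intro ⟨ha, hb⟩; apply hcx; omega)]
  · rw [if_neg hr]
    rw [if_neg (by rw [Prod.ext_iff]; intro ⟨ha, hb⟩; apply hr; omega)]

lemma pvSet_self_len {g : List (List Char)} {row : List Char} {kr kc : Nat}
    (hkr : g[kr]? = some row) :
    (g.set kr (row.set kc '0')).map List.length = g.map List.length := by
  induction g generalizing kr with
  | nil => rfl
  | cons a t ih =>
    cases kr with
    | zero =>
      simp at hkr
      subst hkr
      simp
    | succ n =>
      simp at hkr
      have := ih hkr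
      simp only [List.set_cons_succ, List.map_cons, this]

lemma pvLandP_set {g : List (List Char)} {row : List Char} {kr kc : Nat} {cols : Int}
    (hkr : g[kr]? = some row) (hkc : kc < row.length) :
    ∀ p : Int × Int,
      pvLandP (g.set kr (row.set kc '0')) cols p ↔
        pvLandP g cols p ∧ p ≠ ((kr : Int), (kc : Int)) := by
  intro p
  have hlen : (g.set kr (row.set kc '0')).length = g.length := List.length_set ..
  by_cases hw : pvInW g.length cols p
  · have h1 : 0 ≤ p.1 := hw.1
    have h2 : 0 ≤ p.2 := hw.2.2.1
    have hcell := pvCellL_set hkr hkc p h1 h2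
    by_cases hx : p = ((kr : Int), (kc : Int))
    · rw [if_pos hx] at hcell
      constructor
      · rintro ⟨-, ch, hch, hne⟩
        rw [hcell] at hch
        injection hch with hch
        exact absurd hch.symm hne
      · rintro ⟨-, hne⟩
        exact absurd hx hne
    · rw [if_neg hx] at hcell
      unfold pvLandP
      rw [hlen, hcell]
      constructor
      · rintro ⟨hw', hch⟩; exact ⟨⟨hw', hch⟩, hx⟩
      · rintro ⟨⟨hw', hch⟩, -⟩; exact ⟨hw', hch⟩
  · constructor
    · rintro ⟨hw', -⟩
      rw [hlen] at hw'
      exact absurd hw' hw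
    · rintro ⟨⟨hw', -⟩, -⟩
      exact absurd hw' hw

lemma pvRows_ge {g g' : List (List Char)} {cols : Int}
    (hmap : g'.map List.length = g.map List.length)
    (hrows : ∀ row ∈ g, cols ≤ (row.length : Int)) :
    ∀ row ∈ g', cols ≤ (row.length : Int) := by
  intro row hrow
  obtain ⟨i, hi, rfl⟩ := List.mem_iff_getElem.mp hrow
  have hleng : g'.length = g.length := by
    have := congrArg List.length hmap
    simpa using this
  have hi' : i < g.length := hleng ▸ hi
  have h1 : (g'.map List.length)[i]? = (g.map List.length)[i]? := by rw [hmap]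
  rw [List.getElem?_map, List.getElem?_map] at h1
  simp only [List.getElem?_eq_getElem hi, List.getElem?_eq_getElem hi', Option.map_some] at h1
  injection h1 with h1
  rw [h1]
  exact hrows g[i] (List.getElem_mem hi')

lemma pvMem_nbrsA {g' : List (List Char)} {cr cc : Int} {q : Int × Int} :
    q ∈ pvNbrsA g' cr cc ↔
      q ∈ pvNbrs (cr, cc) ∧ 0 ≤ q.1 ∧ q.1 < g'.length ∧ 0 ≤ q.2 ∧
        q.2 < (PySem.List.pyGetD g' 0 []).length := by
  unfold pvNbrsA pvNbrs
  rw [List.mem_filterMap]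
  constructor
  · rintro ⟨dd, hdd, hf⟩
    dsimp only at hf
    split at hf
    · cases hf
    · rename_i hcond
      push Not at hcond
      injection hf with hf
      subst hf
      exact ⟨List.mem_map_of_mem hdd, by omega, by omega, by omega, by omega⟩
  · rintro ⟨hqn, hb1, hb2, hb3, hb4⟩
    obtain ⟨dd, hdd, hq⟩ := List.mem_map.mp hqn
    subst hq
    refine ⟨dd, hdd, ?_⟩
    dsimp only
    dsimp only at hb1 hb2 hb3 hb4
    rw [if_neg (by omega)]

lemma pvGetD0_len_eq {g g' : List (List Char)}
    (hmap : g'.map List.length = g.map List.length) :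
    (PySem.List.pyGetD g' 0 []).length = (PySem.List.pyGetD g 0 []).length := by
  cases g with
  | nil =>
    cases g' with
    | nil => rfl
    | cons b s => simp at hmap
  | cons a t =>
    cases g' with
    | nil => simp at hmap
    | cons b s =>
      simp only [List.map_cons, List.cons.injEq] at hmap
      rw [PySem.List.pyGetD_zero_cons, PySem.List.pyGetD_zero_cons]
      exact hmap.1

-- ---- the master lemma about A's BFS loop: it counts and zeroes exactly the
-- ---- land cells reachable from the queue ----
lemma pvBfs_spec (cols : Int) :
    ∀ (g : List (List Char)) (q : List (Int × Int)) (k : Int),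
    g ≠ [] →
    ((PySem.List.pyGetD g 0 []).length : Int) = cols →
    (∀ row ∈ g, cols ≤ (row.length : Int)) →
    (∀ p ∈ q, pvInW g.length cols p) →
    (pvBfs g q k).2 = k + ((pvReachFrom (pvLandP g cols) q).ncard : Int) ∧
    (pvBfs g q k).1.map List.length = g.map List.length ∧
    (∀ p : Int × Int, p ∈ pvReachFrom (pvLandP g cols) q →
      pvCellL (pvBfs g q k).1 p = some '0') ∧
    (∀ p : Int × Int, 0 ≤ p.1 → 0 ≤ p.2 → p ∉ pvReachFrom (pvLandP g cols) q →
      pvCellL (pvBfs g q k).1 p = pvCellL g p) := by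
  intro g q k
  induction g, q, k using pvBfs.induct with
  | case1 g k =>
    intro _ _ _ _
    refine ⟨?_, ?_, ?_, ?_⟩
    · rw [pvBfs_nil, pvReachFrom_nil]; simp
    · rw [pvBfs_nil]
    · intro p hp; rw [pvReachFrom_nil] at hp; simp at hp
    · intro p _ _ _; rw [pvBfs_nil]
  | case2 g k cr cc rest hnone ih =>
    intro hg hc hrows hq
    exfalso
    obtain ⟨a1, a2, a3, a4⟩ := hq (cr, cc) List.mem_cons_self
    rw [PySem.List.pyGet?_eq_some_getElem g a1 a2] at hnone
    simp only [Option.bind_some] at hnone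
    have hmem : g[cr.toNat] ∈ g := List.getElem_mem _
    have hrl : cols ≤ (g[cr.toNat].length : Int) := hrows _ hmem
    rw [PySem.List.pyGet?_eq_some_getElem _ a3 (by omega)] at hnone
    cases hnone
  | case3 g k cr cc rest hzero ih =>
    intro hg hc hrows hq
    have hcell : pvCellL g (cr, cc) = some '0' := hzero
    have hnL : ¬ pvLandP g cols (cr, cc) := by
      rintro ⟨-, ch, hch, hne⟩
      rw [hcell] at hch
      injection hch with hch
      exact hne hch.symm
    rw [pvBfs_cons_zero hzero, pvReachFrom_cons_not hnL]
    exact ih hg hc hrows (fun p hp => hq p (List.mem_cons_of_mem _ hp))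
  | case4 g k cr cc rest ch hsome hch gHave ih =>
    intro hg hc hrows hq
    obtain ⟨a1, a2, a3, a4⟩ := hq (cr, cc) List.mem_cons_self
    have hb := hsome
    rw [Option.bind_eq_some_iff] at hb
    obtain ⟨row, hrow, hcell2⟩ := hb
    obtain ⟨hkrlen, hkr?⟩ := pvGet?_bounds hrow a1
    have hrowmem : row ∈ g := List.mem_of_getElem? hkr?
    have hrl : cols ≤ (row.length : Int) := hrows row hrowmem
    obtain ⟨hkclen, hkc?⟩ := pvGet?_bounds hcell2 a3
    have hcrn : ((cr.toNat : Int)) = cr := Int.toNat_of_nonneg a1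
    have hccn : ((cc.toNat : Int)) = cc := Int.toNat_of_nonneg a3
    have hLx0 : pvLandP g cols (cr, cc) := ⟨⟨a1, a2, a3, a4⟩, ch, hsome, hch⟩
    have hg'eq := pvSetD_eq_set hrow hcell2 a1 a3
    rw [pvBfs_cons_land hsome hch]
    set gS := PySem.List.pySetD g cr (PySem.List.pySetD (PySem.List.pyGetD g cr []) cc '0')
      with hgSdef
    have hmap : gS.map List.length = g.map List.length := by
      rw [hg'eq]; exact pvSet_self_len hkr?
    have hlen : gS.length = g.length := by
      have := congrArg List.length hmap
      simpa using this
    have hlenZ : ((gS.length : Nat) : Int) = ((g.length : Nat) : Int) := by rw [hlen]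
    have hgSne : gS ≠ [] := by
      intro hnil
      rw [hnil] at hlen
      exact hg (List.eq_nil_of_length_eq_zero hlen.symm)
    have hc' : ((PySem.List.pyGetD gS 0 []).length : Int) = cols := by
      rw [pvGetD0_len_eq hmap]; exact hc
    have hrows' := pvRows_ge hmap hrows
    have hq' : ∀ p ∈ rest ++ pvNbrsA gS cr cc, pvInW gS.length cols p := by
      intro p hp
      rcases List.mem_append.mp hp with hp | hp
      · obtain ⟨b1, b2, b3, b4⟩ := hq p (List.mem_cons_of_mem _ hp)
        exact ⟨b1, by omega, b3, b4⟩
      · obtain ⟨-, b1, b2, b3, b4⟩ := pvMem_nbrsA.mp hp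
        refine ⟨b1, b2, b3, ?_⟩
        rw [← hc']
        exact b4
    obtain ⟨ih1, ih2, ih3, ih4⟩ := ih hgSne hc' hrows' hq'
    have hL' : ∀ p, pvLandP gS cols p ↔ pvLandP g cols p ∧ p ≠ (cr, cc) := by
      rw [hg'eq]
      have := pvLandP_set (cols := cols) hkr? hkclen
      rw [hcrn, hccn] at this
      exact this
    have hnbW : ∀ n, n ∈ pvNbrs (cr, cc) → pvLandP g cols n → n ∈ pvNbrsA gS cr cc := by
      intro n hn hLn
      obtain ⟨⟨b1, b2, b3, b4⟩, -⟩ := hLn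
      rw [pvMem_nbrsA]
      refine ⟨hn, b1, by omega, b3, ?_⟩
      have : ((PySem.List.pyGetD gS 0 []).length : Int) = cols := hc'
      omega
    have hnbW' : ∀ n ∈ pvNbrsA gS cr cc, n ∈ pvNbrs (cr, cc) :=
      fun n hn => (pvMem_nbrsA.mp hn).1
    obtain ⟨hSeq, hx0notin⟩ := pvReachFrom_decomp hLx0 hL' hnbW hnbW'
    have hfin : (pvReachFrom (pvLandP gS cols) (rest ++ pvNbrsA gS cr cc)).Finite :=
      pvReachFrom_finite gS cols _
    have hncard : (pvReachFrom (pvLandP g cols) ((cr, cc) :: rest)).ncard =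
        (pvReachFrom (pvLandP gS cols) (rest ++ pvNbrsA gS cr cc)).ncard + 1 := by
      rw [hSeq, Set.ncard_insert_of_notMem hx0notin hfin]
    have hcellS : ∀ p : Int × Int, 0 ≤ p.1 → 0 ≤ p.2 →
        pvCellL gS p = if p = (cr, cc) then some '0' else pvCellL g p := by
      rw [hg'eq]
      have := pvCellL_set hkr? hkclen
      rw [hcrn, hccn] at this
      exact this
    refine ⟨?_, ih2.trans hmap, ?_, ?_⟩
    · rw [ih1, hncard]
      push_cast
      ring
    · intro p hpS
      rw [hSeq] at hpS
      rcases Set.mem_insert_iff.mp hpS with rfl | hpS'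
      · rw [ih4 (cr, cc) a1 a3 hx0notin, hcellS (cr, cc) a1 a3, if_pos rfl]
      · exact ih3 p hpS'
    · intro p hp1 hp2 hnp
      have hpne : p ≠ (cr, cc) := by
        intro hpe
        subst hpe
        exact hnp (hSeq ▸ Set.mem_insert _ _)
      have hnp' : p ∉ pvReachFrom (pvLandP gS cols) (rest ++ pvNbrsA gS cr cc) := by
        intro hmem
        exact hnp (hSeq ▸ Set.mem_insert_of_mem _ hmem)
      rw [ih4 p hp1 hp2 hnp', hcellS p hp1 hp2, if_neg hpne]

-- ---- bridges between B's string reads and A's grid of char lists ----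

lemma pvPyGet?_map {α β : Type} (f : α → β) (xs : List α) (i : Int) :
    PySem.List.pyGet? (xs.map f) i = (PySem.List.pyGet? xs i).map f := by
  unfold PySem.List.pyGet?
  rw [List.length_map]
  cases h : PySem.List.pyIdx? xs.length i <;> simp [List.getElem?_map]

lemma pvCellS_eq (blocks : List String) (r c : Int) :
    pvCellS blocks r c = pvCellL (blocks.map String.toList) (r, c) := by
  unfold pvCellS pvCellL
  rw [pvPyGet?_map]
  cases h : PySem.List.pyGet? blocks r <;> simp

lemma pvIsLandCell_iff (blocks : List String) (r c : Int) :
    pvIsLandCell blocks r c = true ↔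
      ∃ ch, pvCellL (blocks.map String.toList) (r, c) = some ch ∧ ch ≠ '0' := by
  unfold pvIsLandCell
  rw [pvCellS_eq]
  cases h : pvCellL (blocks.map String.toList) (r, c) with
  | none => simp
  | some ch => simp [bne_iff_ne]

lemma pvLand0_mem (blocks : List String) (rows cols : Int) (p : Int × Int) :
    p ∈ PySem.Set.ofList ((PySem.List.pyRange 0 rows 1).flatMap (fun r =>
      ((PySem.List.pyRange 0 cols 1).filter (fun c => pvIsLandCell blocks r c)).map
        (fun c => (r, c)))) ↔
      0 ≤ p.1 ∧ p.1 < rows ∧ 0 ≤ p.2 ∧ p.2 < cols ∧ pvIsLandCell blocks p.1 p.2 = true := by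
  rw [PySem.Set.mem_ofList, List.mem_flatMap]
  constructor
  · rintro ⟨r, hr, hp⟩
    obtain ⟨c, hc, hpc⟩ := List.mem_map.mp hp
    rw [List.mem_filter] at hc
    obtain ⟨hcr, hcland⟩ := hc
    rw [PySem.List.mem_pyRange_one] at hr hcr
    subst hpc
    exact ⟨hr.1, hr.2, hcr.1, hcr.2, hcland⟩
  · rintro ⟨h1, h2, h3, h4, h5⟩
    refine ⟨p.1, PySem.List.mem_pyRange_one.mpr ⟨h1, h2⟩, ?_⟩
    rw [List.mem_map]
    refine ⟨p.2, ?_, rfl⟩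
    rw [List.mem_filter]
    exact ⟨PySem.List.mem_pyRange_one.mpr ⟨h3, h4⟩, h5⟩

-- ---- the invariant tying A's mutated grid to B's remaining-land set ----

def pvInv (blocks : List String) (cols : Int)
    (stA : List (List Char) × List Int) (stB : PySem.Set (Int × Int) × List Int) : Prop :=
  stA.2 = stB.2 ∧
  stA.1 ≠ [] ∧
  stA.1.map List.length = (blocks.map String.toList).map List.length ∧
  List.Nodup stB.1 ∧
  (∀ p : Int × Int, p ∈ stB.1 ↔ pvLandP stA.1 cols p) ∧
  (∀ p : Int × Int, p ∈ stB.1 → pvCellL stA.1 p = pvCellL (blocks.map String.toList) p)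

lemma pvFoldl_rel {α β γ : Type} (l : List γ) (f : α → γ → α) (g : β → γ → β)
    (R : α → β → Prop) (h : ∀ x ∈ l, ∀ a b, R a b → R (f a x) (g b x)) :
    ∀ a b, R a b → R (l.foldl f a) (l.foldl g b) := by
  induction l with
  | nil => intro a b hab; exact hab
  | cons x tl ih =>
    intro a b hab
    exact ih (fun y hy a' b' => h y (List.mem_cons_of_mem _ hy) a' b') _ _
      (h x List.mem_cons_self a b hab)

-- ---- one scan cell: both programs either skip it or consume the same island ----

lemma pvCellStep (blocks : List String) (cols : Int)
    (hPreRows : ∀ s ∈ blocks, cols ≤ (s.toList.length : Int))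
    (hcols0 : ((PySem.List.pyGetD (blocks.map String.toList) 0 []).length : Int) = cols)
    (r c : Int) (hr0 : 0 ≤ r) (hr1 : r < (blocks.length : Int)) (hc0 : 0 ≤ c) (hc1 : c < cols)
    (stA : List (List Char) × List Int) (stB : PySem.Set (Int × Int) × List Int)
    (hInv : pvInv blocks cols stA stB) :
    pvInv blocks cols
      (if ((PySem.List.pyGet? stA.1 r).bind fun row => PySem.List.pyGet? row c) = some '1' then
        ((pvBfs stA.1 [(r, c)] 0).1, stA.2 ++ [(pvBfs stA.1 [(r, c)] 0).2])
      else stA)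
      (if pvCellS blocks r c = some '1' ∧ (r, c) ∈ stB.1 then
        (PySem.Set.diff stB.1 (pvGrow stB.1 [(r, c)] [(r, c)]),
          stB.2 ++ [((pvGrow stB.1 [(r, c)] [(r, c)]).length : Int)])
      else stB) := by
  obtain ⟨e1, e2, e3, e4, e5, e6⟩ := hInv
  have hlenA : stA.1.length = blocks.length := by
    have := congrArg List.length e3
    simpa using this
  have htest : (((PySem.List.pyGet? stA.1 r).bind fun row => PySem.List.pyGet? row c) = some '1')
      ↔ (pvCellS blocks r c = some '1' ∧ (r, c) ∈ stB.1) := by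
    have hA : ((PySem.List.pyGet? stA.1 r).bind fun row => PySem.List.pyGet? row c) =
        pvCellL stA.1 (r, c) := rfl
    rw [hA, pvCellS_eq]
    constructor
    · intro h1
      have hland : pvLandP stA.1 cols (r, c) :=
        ⟨⟨hr0, by omega, hc0, hc1⟩, '1', h1, by decide⟩
      have hmem : (r, c) ∈ stB.1 := (e5 _).mpr hland
      exact ⟨by rw [← e6 _ hmem]; exact h1, hmem⟩
    · rintro ⟨h1, hmem⟩
      rw [e6 _ hmem]
      exact h1
  by_cases hA1 : ((PySem.List.pyGet? stA.1 r).bind fun row => PySem.List.pyGet? row c) = some '1'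
  · rw [if_pos hA1, if_pos (htest.mp hA1)]
    obtain ⟨hB1, hmem⟩ := htest.mp hA1
    have hgAne := e2
    have hrowsA : ∀ row ∈ stA.1, cols ≤ (row.length : Int) := by
      refine pvRows_ge e3 ?_
      intro row hrow
      obtain ⟨s, hs, rfl⟩ := List.mem_map.mp hrow
      exact hPreRows s hs
    have hqA : ∀ p ∈ [((r, c) : Int × Int)], pvInW stA.1.length cols p := by
      intro p hp
      rw [List.mem_singleton] at hp
      subst hp
      exact ⟨hr0, by omega, hc0, hc1⟩
    have hcolsA : ((PySem.List.pyGetD stA.1 0 []).length : Int) = cols := by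
      rw [pvGetD0_len_eq e3]; exact hcols0
    obtain ⟨s1, s2, s3, s4⟩ := pvBfs_spec cols stA.1 [(r, c)] 0 hgAne hcolsA hrowsA hqA
    have hland : pvLandP stA.1 cols (r, c) :=
      ⟨⟨hr0, by omega, hc0, hc1⟩, '1', hA1, by decide⟩
    obtain ⟨gn, gl, gm⟩ := pvGrow_spec stB.1 [(r, c)] [(r, c)]
      (List.nodup_singleton _) (fun p hp => hp) (fun p hp => by
        rw [List.mem_singleton] at hp; subst hp; exact hmem)
      (fun p hp hpf => absurd hp hpf)
    have hcompmem : ∀ x, x ∈ pvGrow stB.1 [(r, c)] [(r, c)] ↔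
        pvReach (· ∈ stB.1) (r, c) x := by
      intro x
      rw [gm x]
      constructor
      · rintro (hx | ⟨f, hf, hrf⟩)
        · rw [List.mem_singleton] at hx
          subst hx
          exact Relation.ReflTransGen.refl
        · rw [List.mem_singleton] at hf
          subst hf
          exact hrf
      · intro hx
        exact Or.inr ⟨(r, c), List.mem_singleton.mpr rfl, hx⟩
    have hSmem : ∀ x, x ∈ pvReachFrom (pvLandP stA.1 cols) [(r, c)] ↔
        x ∈ pvGrow stB.1 [(r, c)] [(r, c)] := by
      intro x
      rw [hcompmem x]
      constructor
      · rintro ⟨s, hs, hLs, hr⟩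
        rw [List.mem_singleton] at hs
        subst hs
        exact pvReach_mono (fun p hp => (e5 p).mpr hp) hr
      · intro hx
        exact ⟨(r, c), List.mem_singleton.mpr rfl, hland,
          pvReach_mono (fun p hp => (e5 p).mp hp) hx⟩
    have hScard : (pvReachFrom (pvLandP stA.1 cols) [(r, c)]).ncard =
        (pvGrow stB.1 [(r, c)] [(r, c)]).length := by
      have hSet : pvReachFrom (pvLandP stA.1 cols) [(r, c)] =
          ((pvGrow stB.1 [(r, c)] [(r, c)]).toFinset : Set (Int × Int)) := by
        ext x
        rw [hSmem x, List.coe_toFinset]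
        rfl
      rw [hSet, Set.ncard_coe_finset, List.toFinset_card_of_nodup gn]
    have hresLen : (pvBfs stA.1 [(r, c)] 0).1.length = stA.1.length := by
      have := congrArg List.length s2
      simpa using this
    have hlandRes : ∀ p, pvLandP (pvBfs stA.1 [(r, c)] 0).1 cols p ↔
        (pvLandP stA.1 cols p ∧ p ∉ pvReachFrom (pvLandP stA.1 cols) [(r, c)]) := by
      intro p
      by_cases hpS : p ∈ pvReachFrom (pvLandP stA.1 cols) [(r, c)]
      · have hcell := s3 p hpS
        constructor
        · rintro ⟨-, ch, hch, hne⟩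
          rw [hcell] at hch
          injection hch with hch
          exact absurd hch.symm hne
        · rintro ⟨-, hnp⟩
          exact absurd hpS hnp
      · by_cases hw : pvInW stA.1.length cols p
        · have hcell := s4 p hw.1 hw.2.2.1 hpS
          unfold pvLandP
          rw [hcell, hresLen]
          exact ⟨fun h => ⟨h, hpS⟩, fun h => h.1⟩
        · have hresLenZ : (((pvBfs stA.1 [(r, c)] 0).1.length : Nat) : Int) =
              ((stA.1.length : Nat) : Int) := by rw [hresLen]
          constructor
          · rintro ⟨hw', -⟩
            exfalso
            apply hw
            rw [← hresLenZ]
            exact hw'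
          · rintro ⟨⟨hw', -⟩, -⟩
            exact absurd hw' hw
    refine ⟨?_, ?_, s2.trans e3, PySem.Set.nodup_diff _ _ e4, ?_, ?_⟩
    · simp only
      rw [e1, s1, hScard]
      simp
    · intro hnil
      have hz : (pvBfs stA.1 [(r, c)] 0).1.length = 0 := by rw [hnil]; rfl
      rw [hresLen] at hz
      exact e2 (List.eq_nil_of_length_eq_zero hz)
    · intro p
      simp only
      rw [PySem.Set.mem_diff]
      rw [e5 p, hlandRes p]
      constructor
      · rintro ⟨hL, hnc⟩
        exact ⟨hL, fun hS => hnc ((hSmem p).mp hS)⟩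
      · rintro ⟨hL, hnS⟩
        exact ⟨hL, fun hc => hnS ((hSmem p).mpr hc)⟩
    · intro p hp
      simp only at hp ⊢
      rw [PySem.Set.mem_diff] at hp
      obtain ⟨hpl, hpnc⟩ := hp
      have hL := (e5 p).mp hpl
      have hnS : p ∉ pvReachFrom (pvLandP stA.1 cols) [(r, c)] :=
        fun hS => hpnc ((hSmem p).mp hS)
      rw [s4 p hL.1.1 hL.1.2.2.1 hnS]
      exact e6 p hpl
  · rw [if_neg hA1, if_neg (fun hB => hA1 (htest.mpr hB))]
    exact ⟨e1, e2, e3, e4, e5, e6⟩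

-- ===== VERDICT (by name: the statement is the Claim_ definition above) =====
theorem count_islands_area_bfs_spec : Claim_equal_count_islands_area_bfs := by
  unfold Claim_equal_count_islands_area_bfs
  intro blocks _hdom hpre
  unfold Spec_count_islands_area_bfs
  obtain ⟨hne, hlen0, hrowsPre⟩ := hpre
  obtain ⟨b, t, rfl⟩ := List.exists_cons_of_ne_nil hne
  have hhead : (b :: t).headD "" = b := rfl
  rw [hhead] at hlen0 hrowsPre
  set cols : Int := (b.toList.length : Int) with hcolsdef
  have hrows : ∀ s ∈ b :: t, cols ≤ (s.toList.length : Int) := by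
    intro s hs
    rw [hcolsdef]
    exact_mod_cast hrowsPre s hs
  have hcolsA : PySem.Str.len (PySem.List.pyGetD (b :: t) 0 "") = cols := by
    rw [PySem.List.pyGetD_zero_cons]; rfl
  have hguardA : ¬ ((b :: t : List String).length = 0 ∨
      PySem.Str.len (PySem.List.pyGetD (b :: t) 0 "") = 0) := by
    rintro (h | h)
    · simp at h
    · rw [hcolsA, hcolsdef] at h
      exact hlen0 (by exact_mod_cast h)
  have hcols0 : ((PySem.List.pyGetD ((b :: t).map String.toList) 0 []).length : Int) = cols := by
    simp only [List.map_cons, PySem.List.pyGetD_zero_cons]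
    exact hcolsdef.symm
  unfold count_islands_area_bfs count_islands_area_bfs_alt
  rw [if_neg hguardA]
  simp only [hcolsA]
  refine (pvFoldl_rel _ _ _ (pvInv (b :: t) cols) ?_ _ _ ?_).1
  · intro r hr stA stB hInv
    have hrb := PySem.List.mem_pyRange_one.mp hr
    refine pvFoldl_rel _ _ _ (pvInv (b :: t) cols) ?_ _ _ hInv
    intro c hc stA' stB' hInv'
    have hcb := PySem.List.mem_pyRange_one.mp hc
    exact pvCellStep (b :: t) cols hrows hcols0 r c hrb.1 hrb.2 hcb.1 hcb.2 stA' stB' hInv'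
  · refine ⟨rfl, by simp, rfl, PySem.Set.nodup_ofList _, ?_, fun p _ => rfl⟩
    intro p
    rw [pvLand0_mem]
    unfold pvLandP pvInW
    rw [pvIsLandCell_iff]
    simp only [List.length_map]
    exact ⟨fun ⟨a, b2, c2, d, e⟩ => ⟨⟨a, b2, c2, d⟩, e⟩,
      fun ⟨⟨a, b2, c2, d⟩, e⟩ => ⟨a, b2, c2, d, e⟩⟩
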